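-- pv_equiv track=rewrite | github.com/Jylpah/blitz-tools | analyze_wotb_replays.py | mk_battle_modes
-- ===== SOURCE A (Python) =====
-- def mk_battle_modes(modes: dict):
-- 	"""Make a list of battle modes as required for the _categorizations"""
-- 	mode_ids = modes.values()
-- 	id_max = max(mode_ids)
-- 	ret_modes = ['-'] * (id_max+16)
-- 	for i in range(0, id_max+16):
-- 		ret_modes[i] = 'room_type=' + str(i)
--
-- 	for mode in modes:
-- 		id = modes[mode]
-- 		ret_modes[id] = mode
--
-- 	return ret_modes
-- ===== SOURCE B (Python) =====
-- def mk_battle_modes(modes: dict):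
-- 	"""Make a list of battle modes as required for the _categorizations"""
-- 	pairs = sorted(modes.items(), key=lambda mi: mi[1])
-- 	id_max = pairs[-1][1]
-- 	ret_modes = []
-- 	k = 0
-- 	for i in range(id_max + 16):
-- 		name = 'room_type=' + str(i)
-- 		while k < len(pairs) and pairs[k][1] <= i:
-- 			if pairs[k][1] == i:
-- 				name = pairs[k][0]
-- 			k += 1
-- 		ret_modes.append(name)
-- 	return ret_modes
-- ===== Notes on version B (the rewrite author's own statement) =====
-- stated objective: alternative
-- what changed: B sorts the (mode, id) pairs by id once and produces the result in a single merge sweep over the index range with a cursor into the sorted list (no prefilled list, no index assignment), replacing A's fill-a-default-list-then-overwrite-by-index two-loop construction; Pre_ restricts to the function's natural domain: a non-empty modes dict (on the empty dict A raises ValueError and B IndexError) with non-negative room-type ids (negative ids are malformed here, and the two programs place them differently).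
-- outside the precondition, e.g. on mk_battle_modes({}): A raises ValueError, B raises IndexError
import Mathlib
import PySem

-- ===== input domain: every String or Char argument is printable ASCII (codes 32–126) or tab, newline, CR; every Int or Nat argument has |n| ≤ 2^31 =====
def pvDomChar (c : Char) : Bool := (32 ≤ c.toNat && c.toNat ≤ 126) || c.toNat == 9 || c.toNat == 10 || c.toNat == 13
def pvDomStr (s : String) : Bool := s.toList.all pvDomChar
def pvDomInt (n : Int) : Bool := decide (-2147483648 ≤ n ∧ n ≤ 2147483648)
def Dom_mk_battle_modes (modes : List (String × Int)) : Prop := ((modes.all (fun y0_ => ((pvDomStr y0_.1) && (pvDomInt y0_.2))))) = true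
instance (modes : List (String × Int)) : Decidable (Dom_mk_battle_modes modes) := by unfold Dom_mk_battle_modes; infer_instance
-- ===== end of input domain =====

-- B sorts the (mode, id) pairs by id once and emits the result in a single merge sweep
-- with a cursor into the sorted list, instead of A's fill-a-default-list-then-overwrite-
-- by-index two-loop construction (alternative algorithm, similar cost; return value only —
-- neither version mutates its argument).

-- ===== PORT A =====
def mk_battle_modes (modes : List (String × Int)) : List String :=
  let d := PySem.Dict.ofList modes
  let mode_ids := PySem.Dict.values d                      -- modes.values()
  match PySem.List.max? mode_ids (fun x => x) with
  | none => []                                             -- max([]) raises ValueError: excluded by Pre_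
  | some id_max =>
    let ret0 := PySem.List.pyRepeat ["-"] (id_max + 16)    -- ['-'] * (id_max+16)
    let ret1 := (PySem.List.pyRange 0 (id_max + 16) 1).foldl
        (fun acc i => PySem.List.pySetD acc i ("room_type=" ++ PySem.Int.toStr i)) ret0
    (PySem.Dict.keys d).foldl                              -- for mode in modes: id = modes[mode]; ret_modes[id] = mode
        (fun acc mode =>
          match PySem.Dict.get? d mode with
          | some id => PySem.List.pySetD acc id mode       -- pySetD total: out-of-range id (IndexError) excluded by Pre_
          | none => acc) ret1                              -- unreachable: mode ∈ keys

-- ===== PORT B =====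
-- the inner 'while k < len(pairs) and pairs[k][1] <= i' cursor loop: the cursor is the
-- still-unconsumed suffix of the sorted pairs; returns (name, remaining suffix)
def bWhile (pairs : List (String × Int)) (i : Int) (name : String) : String × List (String × Int) :=
  match pairs with
  | [] => (name, [])
  | p :: rest =>
    if p.2 ≤ i then bWhile rest i (if p.2 = i then p.1 else name)
    else (name, p :: rest)

-- the outer 'for i in range(id_max + 16)' loop appending one name per index
def bFor (pairs : List (String × Int)) (idxs : List Int) : List String :=
  match idxs with
  | [] => []
  | i :: is =>
    let r := bWhile pairs i ("room_type=" ++ PySem.Int.toStr i)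
    r.1 :: bFor r.2 is

def mk_battle_modes_alt (modes : List (String × Int)) : List String :=
  let d := PySem.Dict.ofList modes
  let pairs := PySem.List.sorted (PySem.Dict.items d) (fun mi => mi.2) false   -- sorted(modes.items(), key=...)
  match PySem.List.pyGet? pairs (-1) with
  | none => []                                             -- pairs[-1] raises IndexError on the empty dict: excluded by Pre_
  | some lastp =>
    bFor pairs (PySem.List.pyRange 0 (lastp.2 + 16) 1)

-- ===== PRECONDITION & SPEC =====
-- Pre_ restricts to the function's natural domain: a non-empty modes dict (on the empty
-- dict both programs raise — A: ValueError from max([]), B: IndexError from pairs[-1])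
-- whose room-type ids are non-negative (negative ids are malformed input here, and the
-- two programs place them differently; see claim.json cites).
def Pre_mk_battle_modes (modes : List (String × Int)) : Prop :=
  modes ≠ [] ∧ ∀ p ∈ modes, 0 ≤ p.2
instance (modes : List (String × Int)) : Decidable (Pre_mk_battle_modes modes) := by
  unfold Pre_mk_battle_modes; infer_instance
def pvWitness_mk_battle_modes : (List (String × Int)) := [("ctf", 1), ("rating", 7)]

def Spec_mk_battle_modes (modes : List (String × Int)) (out : List String) : Prop :=
  out = mk_battle_modes_alt modes
instance (modes : List (String × Int)) (out : List String) : Decidable (Spec_mk_battle_modes modes out) := by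
  unfold Spec_mk_battle_modes; infer_instance

-- ===== CLAIM (what is proved, stated in full; the proofs are below) =====
def Claim_equal_mk_battle_modes : Prop := ∀ (modes : List (String × Int)), Dom_mk_battle_modes modes → Pre_mk_battle_modes modes → Spec_mk_battle_modes modes (mk_battle_modes modes)

-- ===== LEMMAS AND PROOFS =====

-- the common description of one output slot: the LAST (in dict insertion order) mode name
-- whose id is j, else 'room_type=j'
def slotVal (items : List (String × Int)) (j : Int) : String :=
  (((items.filter (fun p => p.2 == j)).getLast?).map Prod.fst).getD
    ("room_type=" ++ PySem.Int.toStr j)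

-- ---------- generic list lemmas ----------

theorem reverse_find?_eq_getLast?_filter {α : Type} (l : List α) (p : α → Bool) :
    l.reverse.find? p = (l.filter p).getLast? := by
  induction l with
  | nil => rfl
  | cons x t ih =>
    rw [List.reverse_cons, List.find?_append, ih, List.filter_cons]
    by_cases hx : p x = true
    · rw [if_pos hx, List.getLast?_cons]
      cases h : (t.filter p).getLast? with
      | none => simp [List.find?, hx]
      | some y => simp
    · simp [hx]

theorem find?_congr_mem {α : Type} (l : List α) (p q : α → Bool)
    (h : ∀ a ∈ l, p a = q a) : l.find? p = l.find? q := by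
  induction l with
  | nil => rfl
  | cons x t ih =>
    by_cases hq : q x = true
    · rw [List.find?_cons_of_pos ((h x (List.mem_cons_self ..)).trans hq),
        List.find?_cons_of_pos hq]
    · rw [List.find?_cons_of_neg (by rw [h x (List.mem_cons_self ..)]; simpa using hq),
        List.find?_cons_of_neg (by simpa using hq)]
      exact ih (fun a ha => h a (List.mem_cons_of_mem _ ha))

theorem getLast?_pairwise_max (l : List (String × Int)) (a : String × Int)
    (hs : l.Pairwise (fun x y => x.2 ≤ y.2)) (hl : l.getLast? = some a) :
    ∀ y ∈ l, y.2 ≤ a.2 := by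
  induction l with
  | nil => simp at hl
  | cons x t ih =>
    rw [List.getLast?_cons] at hl
    intro y hy
    cases t with
    | nil =>
      simp at hl hy
      simp [hy, ← hl]
    | cons z t' =>
      cases hlast : (z :: t').getLast? with
      | none => simp at hlast
      | some b =>
        rw [hlast] at hl
        have hab : a = b := by simpa using hl.symm
        rw [← hab] at hlast
        rcases List.mem_cons.mp hy with rfl | hyt
        · exact (List.pairwise_cons.mp hs).1 a (List.mem_of_getLast? hlast)
        · exact ih (List.pairwise_cons.mp hs).2 hlast y hyt

-- ---------- stability of the PySem insertion sort for the per-id groups ----------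

theorem filter_insertBy (x : String × Int) (ys : List (String × Int)) (j : Int)
    (hs : ys.Pairwise (fun a b => a.2 ≤ b.2)) :
    (PySem.List.insertBy (fun a b => decide (a.2 < b.2)) x ys).filter (fun p => p.2 == j)
      = if x.2 = j then ys.filter (fun p => p.2 == j) ++ [x]
        else ys.filter (fun p => p.2 == j) := by
  induction ys with
  | nil =>
    simp only [PySem.List.insertBy, List.filter_nil]
    by_cases hx : x.2 = j <;> simp [hx]
  | cons y t ih =>
    obtain ⟨hy, ht⟩ := List.pairwise_cons.mp hs
    simp only [PySem.List.insertBy]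
    by_cases hlt : x.2 < y.2
    · rw [if_pos (by simpa using hlt)]
      by_cases hx : x.2 = j
      · -- every element of y :: t has id ≥ y.2 > j, so their filter is empty
        have hnil : (y :: t).filter (fun p => p.2 == j) = [] := by
          rw [List.filter_eq_nil_iff]
          intro z hz
          rcases List.mem_cons.mp hz with rfl | hzt
          · simp; omega
          · have := hy z hzt; simp; omega
        simp [hx, hnil]
      · rw [List.filter_cons, if_neg (by simp [hx]), if_neg hx]
    · rw [if_neg (by simpa using hlt)]
      rw [List.filter_cons, List.filter_cons, ih ht]
      by_cases hx : x.2 = j <;> by_cases hyj : y.2 = j <;>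
        simp [hx, hyj]

theorem filter_sorted_eq (xs : List (String × Int)) (j : Int) :
    (PySem.List.sorted xs (fun p => p.2) false).filter (fun p => p.2 == j)
      = xs.filter (fun p => p.2 == j) := by
  induction xs using List.reverseRecOn with
  | nil => rfl
  | append_singleton t x ih =>
    have hstep : PySem.List.sorted (t ++ [x]) (fun p => p.2) false
        = PySem.List.insertBy (fun a b => decide (a.2 < b.2)) x
            (PySem.List.sorted t (fun p => p.2) false) := by
      rw [PySem.List.sorted_eq_foldl_insertBy, PySem.List.sorted_eq_foldl_insertBy,
        List.foldl_append, List.foldl_cons, List.foldl_nil]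
    rw [hstep, filter_insertBy x _ j (PySem.List.sorted_pairwise t (fun p => p.2)), ih,
      List.filter_append, List.filter_cons, List.filter_nil]
    by_cases hx : x.2 = j <;> simp [hx]

-- ---------- B's merge sweep ----------

theorem bWhile_eq (pairs : List (String × Int)) (i : Int) (name : String)
    (hs : pairs.Pairwise (fun a b => a.2 ≤ b.2)) (hlb : ∀ p ∈ pairs, i ≤ p.2) :
    bWhile pairs i name =
      ((((pairs.filter (fun p => p.2 == i)).getLast?).map Prod.fst).getD name,
       pairs.dropWhile (fun p => p.2 ≤ i)) := by
  induction pairs generalizing name with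
  | nil => simp [bWhile]
  | cons p rest ih =>
    obtain ⟨hp, ht⟩ := List.pairwise_cons.mp hs
    by_cases hle : p.2 ≤ i
    · have hpi : p.2 = i := le_antisymm hle (hlb p (List.mem_cons_self ..))
      rw [show bWhile (p :: rest) i name = bWhile rest i p.1 by
        simp [bWhile, hpi]]
      rw [ih p.1 ht (fun q hq => hlb q (List.mem_cons_of_mem _ hq))]
      rw [show (p :: rest).dropWhile (fun p => decide (p.2 ≤ i)) =
            rest.dropWhile (fun p => decide (p.2 ≤ i)) by simp [List.dropWhile, hle]]
      rw [List.filter_cons, if_pos (by simp [hpi]), List.getLast?_cons]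
      cases h : (rest.filter (fun p => p.2 == i)).getLast? with
      | none => simp
      | some q => simp
    · rw [show bWhile (p :: rest) i name = (name, p :: rest) by simp [bWhile, hle]]
      have hnil : (p :: rest).filter (fun q => q.2 == i) = [] := by
        rw [List.filter_eq_nil_iff]
        intro z hz
        rcases List.mem_cons.mp hz with rfl | hzt
        · simp; omega
        · have := hp z hzt; simp; omega
      rw [hnil, show (p :: rest).dropWhile (fun p => decide (p.2 ≤ i)) = p :: rest by
        simp [List.dropWhile, hle]]
      rfl

theorem lb_dropWhile (pairs : List (String × Int)) (i : Int)
    (hs : pairs.Pairwise (fun a b => a.2 ≤ b.2)) :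
    ∀ p ∈ pairs.dropWhile (fun p => p.2 ≤ i), i + 1 ≤ p.2 := by
  induction pairs with
  | nil => simp
  | cons p rest ih =>
    obtain ⟨hp, ht⟩ := List.pairwise_cons.mp hs
    by_cases hle : p.2 ≤ i
    · rw [show (p :: rest).dropWhile (fun p => decide (p.2 ≤ i)) =
          rest.dropWhile (fun p => decide (p.2 ≤ i)) by simp [List.dropWhile, hle]]
      exact ih ht
    · rw [show (p :: rest).dropWhile (fun p => decide (p.2 ≤ i)) = p :: rest by
          simp [List.dropWhile, hle]]
      intro q hq
      rcases List.mem_cons.mp hq with rfl | hqt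
      · omega
      · have := hp q hqt; omega

-- consumed prefix elements (ids ≤ i) contribute nothing to a filter at id j > i
theorem filter_dropWhile_eq (pairs : List (String × Int)) (i j : Int) (hij : i < j) :
    (pairs.dropWhile (fun p => p.2 ≤ i)).filter (fun p => p.2 == j)
      = pairs.filter (fun p => p.2 == j) := by
  have h1 : (pairs.takeWhile (fun p => decide (p.2 ≤ i))).filter (fun p => p.2 == j) = [] := by
    rw [List.filter_eq_nil_iff]
    intro z hz
    have := List.mem_takeWhile_imp hz
    simp at this ⊢
    omega
  conv_rhs => rw [← List.takeWhile_append_dropWhile (p := fun p => decide (p.2 ≤ i)) (l := pairs)]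
  rw [List.filter_append, h1, List.nil_append]

theorem bFor_eq (n : Nat) : ∀ (pairs : List (String × Int)) (i m : Int),
    (m - i).toNat = n →
    pairs.Pairwise (fun a b => a.2 ≤ b.2) → (∀ p ∈ pairs, i ≤ p.2) →
    bFor pairs (PySem.List.pyRange i m 1)
      = (PySem.List.pyRange i m 1).map (slotVal pairs) := by
  induction n with
  | zero =>
    intro pairs i m hn _ _
    rw [PySem.List.pyRange_one_eq_nil (by omega)]
    rfl
  | succ k ih =>
    intro pairs i m hn hs hlb
    have him : i < m := by omega
    rw [PySem.List.pyRange_one_cons him]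
    rw [show bFor pairs (i :: PySem.List.pyRange (i+1) m 1)
        = (bWhile pairs i ("room_type=" ++ PySem.Int.toStr i)).1
          :: bFor (bWhile pairs i ("room_type=" ++ PySem.Int.toStr i)).2
               (PySem.List.pyRange (i+1) m 1) from rfl]
    rw [bWhile_eq pairs i _ hs hlb]
    have hrest := lb_dropWhile pairs i hs
    have hsrest : (pairs.dropWhile (fun p => p.2 ≤ i)).Pairwise (fun a b => a.2 ≤ b.2) :=
      hs.sublist (List.dropWhile_sublist _)
    rw [ih _ (i+1) m (by omega) hsrest hrest]
    rw [List.map_cons]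
    congr 1
    apply List.map_congr_left
    intro j hj
    have hij : i < j := by
      have := (PySem.List.mem_pyRange_one.mp hj).1; omega
    unfold slotVal
    rw [filter_dropWhile_eq pairs i j hij]

-- ---------- A's two index-assignment loops (adapted fold lemmas) ----------

theorem length_foldl_pySetD {σ β : Type} (ps : List σ) (idx : σ → Int) (val : σ → β)
    (base : List β) :
    (ps.foldl (fun acc p => PySem.List.pySetD acc (idx p) (val p)) base).length
      = base.length := by
  induction ps generalizing base with
  | nil => rfl
  | cons p rest ih => simp [List.foldl_cons, ih, PySem.List.length_pySetD]

-- a fold of in-range list assignments, read back at position j: the LAST write to slot j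
-- wins (Python's s[i] = v writes slot i % len for -len ≤ i < len)
theorem getElem?_foldl_pySetD {σ β : Type} (ps : List σ) (idx : σ → Int) (val : σ → β)
    (base : List β)
    (hin : ∀ p ∈ ps, -(base.length : Int) ≤ idx p ∧ idx p < (base.length : Int)) (j : Nat) :
    (ps.foldl (fun acc p => PySem.List.pySetD acc (idx p) (val p)) base)[j]? =
      match ps.reverse.find? (fun p => PySem.Int.mod (idx p) (base.length : Int) == (j : Int)) with
      | some p => some (val p)
      | none => base[j]? := by
  induction ps generalizing base with
  | nil => rfl
  | cons p rest ih =>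
    obtain ⟨hp0, hplt⟩ := hin p (List.mem_cons_self ..)
    have hlpos : 0 < base.length := by by_contra h; omega
    have hlen : (PySem.List.pySetD base (idx p) (val p)).length = base.length :=
      PySem.List.length_pySetD ..
    have hin' : ∀ q ∈ rest, -((PySem.List.pySetD base (idx p) (val p)).length : Int) ≤ idx q ∧ idx q < ((PySem.List.pySetD base (idx p) (val p)).length : Int) := by
      intro q hq; rw [hlen]; exact hin q (List.mem_cons_of_mem _ hq)
    rw [List.foldl_cons, ih _ hin', hlen, List.reverse_cons, List.find?_append]
    cases hfind : rest.reverse.find? (fun q => PySem.Int.mod (idx q) (base.length : Int) == (j : Int)) with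
    | some q => rfl
    | none =>
      simp only [Option.none_or, List.find?_cons, List.find?_nil]
      have hmod : PySem.Int.mod (idx p) (base.length : Int)
          = if 0 ≤ idx p then idx p else idx p + (base.length : Int) := by
        rw [PySem.Int.mod_eq_emod_of_pos (by omega)]
        split_ifs with h
        · exact Int.emod_eq_of_lt h hplt
        · have hrad : (idx p + (base.length : Int)) % (base.length : Int)
              = idx p % (base.length : Int) := by
            have h1 := Int.add_mul_emod_self_left (a := idx p) (b := (base.length : Int)) (c := 1)
            rw [mul_one] at h1
            exact h1
          rw [← hrad]
          exact Int.emod_eq_of_lt (by omega) (by omega)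
      have hidx : PySem.List.pyIdx? base.length (idx p)
          = some ((PySem.Int.mod (idx p) (base.length : Int)).toNat) := by
        unfold PySem.List.pyIdx?
        by_cases h : 0 ≤ idx p
        · rw [if_pos h, if_pos hplt, hmod, if_pos h]
        · rw [if_neg h, if_pos hp0, hmod, if_neg h]
          congr 1
          omega
      rw [show PySem.List.pySetD base (idx p) (val p)
            = base.set ((PySem.Int.mod (idx p) (base.length : Int)).toNat) (val p) by
          simp [PySem.List.pySetD, PySem.List.pySet?, hidx]]
      rw [List.getElem?_set]
      have hmnn : 0 ≤ PySem.Int.mod (idx p) (base.length : Int) := by rw [hmod]; split_ifs <;> omega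
      by_cases hj : PySem.Int.mod (idx p) (base.length : Int) = (j : Int)
      · have ht : (PySem.Int.mod (idx p) (base.length : Int)).toNat = j := by omega
        have hjlt : j < base.length := by rw [hmod] at hj; split_ifs at hj <;> omega
        simp [hj, hjlt]
      · have h1 : (PySem.Int.mod (idx p) (base.length : Int) == (j : Int)) = false := by simp [hj]
        have h2 : ¬ (PySem.Int.mod (idx p) (base.length : Int)).toNat = j := by omega
        simp [h1, h2]

-- A's second loop, iterating the keys and looking each one up, is the fold over the items.
theorem keysfold_eq_itemsfold (d : PySem.Dict String Int) (hnd : d.keys.Nodup)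
    (init : List String) :
    d.keys.foldl (fun acc mode => match PySem.Dict.get? d mode with
      | some id => PySem.List.pySetD acc id mode
      | none => acc) init
    = d.items.foldl (fun acc p => PySem.List.pySetD acc p.2 p.1) init := by
  rw [PySem.Dict.items_eq_map_keys d hnd 0, List.foldl_map]
  apply PySem.List.foldl_congr_mem
  intro acc k hk
  have hsome : PySem.Dict.get? d k = some (PySem.Dict.getD d k 0) := by
    cases hg : PySem.Dict.get? d k with
    | none => exact absurd ((PySem.Dict.get?_eq_none_iff_not_mem_keys d k).mp hg) (by simpa using hk)
    | some v => rw [PySem.Dict.getD_of_get?_eq_some d 0 hg]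
  rw [hsome]

-- ---------- the values of ofList come from the input list ----------

theorem mem_values_foldl_insert (ps : List (String × Int)) (d : PySem.Dict String Int)
    (v : Int) (hv : v ∈ (ps.foldl (fun acc p => acc.insert p.1 p.2) d).values) :
    v ∈ d.values ∨ ∃ p ∈ ps, v = p.2 := by
  induction ps generalizing d with
  | nil => exact Or.inl hv
  | cons p rest ih =>
    rw [List.foldl_cons] at hv
    rcases ih (d.insert p.1 p.2) hv with h | h
    · rcases PySem.Dict.mem_values_insert d p.1 p.2 v h with rfl | h'
      · exact Or.inr ⟨p, List.mem_cons_self .., rfl⟩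
      · exact Or.inl h'
    · obtain ⟨q, hq, hvq⟩ := h
      exact Or.inr ⟨q, List.mem_cons_of_mem _ hq, hvq⟩

theorem values_ofList_nonempty (modes : List (String × Int)) (hne : modes ≠ []) :
    (PySem.Dict.ofList modes).values ≠ [] := by
  have hkeys : (PySem.Dict.ofList modes).keys = PySem.Set.ofList (modes.map Prod.fst) := by
    show (modes.foldl (fun acc p => acc.insert p.1 p.2) PySem.Dict.empty).keys = _
    rw [PySem.Dict.keys_foldl_insert_key modes Prod.fst (fun d p => p.2) PySem.Dict.empty]
    rfl
  intro hv
  cases modes with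
  | nil => exact hne rfl
  | cons p rest =>
    have hk : p.1 ∈ (PySem.Dict.ofList (p :: rest)).keys := by
      rw [hkeys]
      rw [PySem.Set.mem_ofList]
      simp
    have : (PySem.Dict.ofList (p :: rest)).keys = [] := by
      have hlen : (PySem.Dict.ofList (p :: rest)).values.length
          = (PySem.Dict.ofList (p :: rest)).keys.length := by
        simp [PySem.Dict.values, PySem.Dict.keys]
      rw [hv] at hlen
      exact List.eq_nil_of_length_eq_zero hlen.symm
    rw [this] at hk
    simp at hk

-- ===== VERDICT =====

theorem mk_battle_modes_spec : Claim_equal_mk_battle_modes := by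
  intro modes _ hpre
  obtain ⟨hne, hnn⟩ := hpre
  unfold Spec_mk_battle_modes
  simp only [mk_battle_modes, mk_battle_modes_alt]
  set d := PySem.Dict.ofList modes with hd
  have hvne : d.values ≠ [] := values_ofList_nonempty modes hne
  cases hmax : PySem.List.max? d.values (fun x => x) with
  | none => exact absurd ((PySem.List.max?_eq_none_iff _ _).mp hmax) hvne
  | some M =>
  dsimp only
  have hM_mem : M ∈ d.values := PySem.List.max?_mem hmax
  have hle : ∀ v ∈ d.values, v ≤ M := fun v hv => PySem.List.max?_isMax hmax v hv
  have hvals_nn : ∀ v ∈ d.values, 0 ≤ v := by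
    intro v hv
    rcases mem_values_foldl_insert modes PySem.Dict.empty v hv with h | ⟨p, hp, rfl⟩
    · simp [PySem.Dict.values, PySem.Dict.empty] at h
    · exact hnn p hp
  have hM0 : 0 ≤ M := hvals_nn M hM_mem
  -- the B side
  set pairs := PySem.List.sorted d.items (fun mi => mi.2) false with hpairs
  have hperm : pairs.Perm d.items := PySem.List.sorted_perm d.items (fun mi => mi.2) false
  have hpne : pairs ≠ [] := by
    intro h
    have hde : d.items = [] := List.Perm.eq_nil ((h ▸ hperm).symm)
    exact hvne (by simp [PySem.Dict.values, hde])
  have hsorted : pairs.Pairwise (fun a b => a.2 ≤ b.2) :=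
    PySem.List.sorted_pairwise d.items (fun mi => mi.2)
  cases hlastp : pairs.getLast? with
  | none => exact absurd (List.getLast?_eq_none_iff.mp hlastp) hpne
  | some lastp =>
  rw [PySem.List.pyGet?_neg_one, hlastp]
  dsimp only
  -- lastp.2 = M : both are the maximum of the (same multiset of) ids
  have hmemvals : ∀ q ∈ pairs, q.2 ∈ d.values := by
    intro q hq
    have : q ∈ d.items := hperm.mem_iff.mp hq
    exact List.mem_map_of_mem this
  have hlastM : lastp.2 = M := by
    have h1 : lastp.2 ≤ M := hle _ (hmemvals lastp (List.mem_of_getLast? hlastp))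
    obtain ⟨qM, hqM, hqM2⟩ := List.mem_map.mp hM_mem
    have hqMp : qM ∈ pairs := hperm.mem_iff.mpr hqM
    have h2 := getLast?_pairwise_max pairs lastp hsorted hlastp qM hqMp
    omega
  rw [hlastM]
  set n : Int := M + 16 with hn
  have hnpos : 0 < n := by omega
  -- evaluate B via the merge-sweep lemma, then push the filter back to d.items (stability)
  have hlb0 : ∀ p ∈ pairs, (0:Int) ≤ p.2 := fun p hp => hvals_nn _ (hmemvals p hp)
  rw [bFor_eq (n - 0).toNat pairs 0 n rfl hsorted hlb0]
  have hBmap : (PySem.List.pyRange 0 n 1).map (slotVal pairs)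
      = (PySem.List.pyRange 0 n 1).map (slotVal d.items) := by
    apply List.map_congr_left
    intro j _
    unfold slotVal
    rw [hpairs, filter_sorted_eq d.items j]
  rw [hBmap]
  -- evaluate A pointwise
  set rt : Int → String := fun i => "room_type=" ++ PySem.Int.toStr i with hrt
  set ret0 : List String := PySem.List.pyRepeat ["-"] n with hret0
  set ret1 : List String := (PySem.List.pyRange 0 n 1).foldl
      (fun acc i => PySem.List.pySetD acc i (rt i)) ret0 with hret1
  have hlen0 : ret0.length = n.toNat := by
    rw [hret0, PySem.List.pyRepeat_singleton]; simp
  have hlen0c : (ret0.length : Int) = n := by rw [hlen0]; omega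
  have hlen1 : ret1.length = n.toNat := by
    rw [hret1, length_foldl_pySetD _ (fun i => i) rt, hlen0]
  have hlen1c : (ret1.length : Int) = n := by rw [hlen1]; omega
  -- the first loop writes rt i at every i
  have hfill : ∀ j : Nat, j < n.toNat → ret1[j]? = some (rt (j : Int)) := by
    intro j hj
    have hin : ∀ i ∈ PySem.List.pyRange 0 n 1, -(ret0.length : Int) ≤ i ∧ i < (ret0.length : Int) := by
      intro i hi
      rw [PySem.List.mem_pyRange_one] at hi
      rw [hlen0c]
      omega
    rw [hret1, getElem?_foldl_pySetD _ (fun i => i) rt ret0 hin j]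
    simp only [hlen0c]
    have hjmem : (j : Int) ∈ (PySem.List.pyRange 0 n 1).reverse := by
      rw [List.mem_reverse, PySem.List.mem_pyRange_one]
      refine ⟨Int.natCast_nonneg j, ?_⟩
      omega
    have hpj : (PySem.Int.mod ((j : Int)) n == (j : Int)) = true := by
      have hjn : (j : Int) < n := by omega
      rw [PySem.Int.mod_eq_emod_of_pos hnpos, Int.emod_eq_of_lt (Int.natCast_nonneg j) hjn]
      simp
    have hfsome : ((PySem.List.pyRange 0 n 1).reverse.find? (fun i => PySem.Int.mod i n == (j : Int))).isSome := by
      rw [List.find?_isSome]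
      exact ⟨(j : Int), hjmem, hpj⟩
    cases hf : (PySem.List.pyRange 0 n 1).reverse.find? (fun i => PySem.Int.mod i n == (j : Int)) with
    | none => rw [hf] at hfsome; simp at hfsome
    | some i0 =>
      have hmem : i0 ∈ PySem.List.pyRange 0 n 1 := List.mem_reverse.mp (List.mem_of_find?_eq_some hf)
      rw [PySem.List.mem_pyRange_one] at hmem
      have : i0 = (j : Int) := by
        have h := List.find?_some hf
        rw [PySem.Int.mod_eq_emod_of_pos hnpos, Int.emod_eq_of_lt hmem.1 hmem.2] at h
        simpa using h
      simp [this]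
  -- the second loop: keys-with-lookup fold = items fold
  rw [keysfold_eq_itemsfold d (by rw [hd]; exact PySem.Dict.nodup_keys_ofList modes) ret1]
  -- pointwise comparison
  apply List.ext_getElem?
  intro j
  have hlenA : (d.items.foldl (fun acc p => PySem.List.pySetD acc p.2 p.1) ret1).length = n.toNat := by
    rw [length_foldl_pySetD _ (fun p : String × Int => p.2) (fun p => p.1), hlen1]
  by_cases hj : j < n.toNat
  · -- in range
    have hvin : ∀ p ∈ d.items, p.2 ∈ d.values := fun p hp => List.mem_map_of_mem hp
    have hin : ∀ p ∈ d.items, -(ret1.length : Int) ≤ p.2 ∧ p.2 < (ret1.length : Int) := by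
      intro p hp
      have h1 := hvals_nn _ (hvin p hp)
      have h2 := hle _ (hvin p hp)
      rw [hlen1c]
      omega
    rw [getElem?_foldl_pySetD _ (fun p : String × Int => p.2) (fun p => p.1) ret1 hin j]
    simp only [hlen1c]
    -- every id is in [0, n): its Python slot is itself
    have hfind : d.items.reverse.find? (fun p => PySem.Int.mod p.2 n == (j : Int))
        = d.items.reverse.find? (fun p => p.2 == (j : Int)) := by
      apply find?_congr_mem
      intro p hp
      have hpv := hvin p (List.mem_reverse.mp hp)
      have h1 := hvals_nn _ hpv
      have h2 := hle _ hpv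
      rw [PySem.Int.mod_eq_emod_of_pos hnpos, Int.emod_eq_of_lt h1 (by omega)]
    rw [hfind, reverse_find?_eq_getLast?_filter]
    have hmapj : ((PySem.List.pyRange 0 n 1).map (slotVal d.items))[j]? = some (slotVal d.items (j : Int)) := by
      rw [List.getElem?_map, PySem.List.getElem?_pyRange_one]
      simp [hj]
    rw [hmapj]
    unfold slotVal
    cases hf : (d.items.filter (fun p => p.2 == (j : Int))).getLast? with
    | some p => simp
    | none => simp [hfill j hj, hrt]
  · -- out of range: both none
    rw [List.getElem?_eq_none, List.getElem?_eq_none]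
    · rw [List.length_map, PySem.List.length_pyRange_one]; omega
    · rw [hlenA]; omega
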